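-- pv_equiv track=rewrite | github.com/wearefair/modelmapper | modelmapper/misc.py | escape_word
-- ===== SOURCE A (Python) =====
-- from string import ascii_lowercase, digits
--
-- _ESCAPE_ACCEPTABLED = frozenset(ascii_lowercase + digits)
--
-- def escape_word(word):
--     """
--     Use this to create consistent escaped words
--     """
--     result = []
--     last_i = None
--     for i in word.lower().strip():
--         if i in _ESCAPE_ACCEPTABLED:
--             result.append(i)
--         else:
--             i = '_'
--             if i != last_i:
--                 result.append(i)
--         last_i = i
--     return ''.join(result).strip('_')
-- ===== SOURCE B (Python) =====
-- from string import ascii_lowercase, digits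
--
-- def escape_word(word):
--     """
--     Use this to create consistent escaped words
--     """
--     ok = set(ascii_lowercase + digits)
--     s = word.lower().strip()
--     return '_'.join(''.join(c if c in ok else ' ' for c in s).split())
-- ===== Notes on version B (the rewrite author's own statement) =====
-- stated objective: idiomatic
-- what changed: A's character loop that tracks the previous character to collapse runs and finally strips boundary underscores is replaced by mapping every character of the lowercased stripped word that is not an ASCII lowercase letter or digit to a space, whitespace-splitting (which collapses runs and drops boundaries), and joining the tokens with an underscore.
import Mathlib
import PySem

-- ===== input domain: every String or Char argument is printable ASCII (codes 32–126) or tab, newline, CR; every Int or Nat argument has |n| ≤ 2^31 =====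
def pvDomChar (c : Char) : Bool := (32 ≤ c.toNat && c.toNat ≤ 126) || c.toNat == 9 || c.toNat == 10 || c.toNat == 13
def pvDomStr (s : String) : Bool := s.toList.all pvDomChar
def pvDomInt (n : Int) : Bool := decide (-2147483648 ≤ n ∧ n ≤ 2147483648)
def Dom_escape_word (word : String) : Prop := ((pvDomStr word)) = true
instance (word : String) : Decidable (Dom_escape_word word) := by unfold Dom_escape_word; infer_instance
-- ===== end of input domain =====

-- B replaces A's manual last-character-tracking loop by "map non-alphanumerics to spaces, whitespace-split, '_'-join" (objective: idiomatic).

-- ===== PORT A =====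
-- _ESCAPE_ACCEPTABLED = frozenset(ascii_lowercase + digits)
def pyEscapeAcceptabled : PySem.Set Char :=
  PySem.Set.ofList ("abcdefghijklmnopqrstuvwxyz0123456789".toList)

def escape_word (word : String) : String :=
  -- the loop over word.lower().strip() with state (result, last_i), then ''.join(result).strip('_')
  PySem.Str.stripChars
    (String.ofList
      (((PySem.Str.strip (PySem.Str.lower word)).toList.foldl
        (fun (st : List Char × Option Char) i =>
          if PySem.Set.contains pyEscapeAcceptabled i then (st.1 ++ [i], some i)
          else if some '_' ≠ st.2 then (st.1 ++ ['_'], some '_') else (st.1, some '_'))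
        ([], none)).1))
    "_"

-- ===== PORT B =====
-- ok = set(ascii_lowercase + digits)
def pyOkSet : PySem.Set Char :=
  PySem.Set.ofList ("abcdefghijklmnopqrstuvwxyz0123456789".toList)

def escape_word_alt (word : String) : String :=
  -- s = word.lower().strip(); '_'.join(mapped.split())
  PySem.Str.join "_"
    (PySem.Str.split₀
      (String.ofList ((PySem.Str.strip (PySem.Str.lower word)).toList.map
        (fun c => if PySem.Set.contains pyOkSet c then c else ' '))))

-- ===== PRECONDITION & SPEC =====
def Spec_escape_word (word : String) (out : String) : Prop := out = escape_word_alt word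
instance (word : String) (out : String) : Decidable (Spec_escape_word word out) := by unfold Spec_escape_word; infer_instance

-- ===== CLAIM (what is proved, stated in full; the proofs are below) =====
def Claim_equal_escape_word : Prop := ∀ (word : String), Dom_escape_word word → Spec_escape_word word (escape_word word)

-- ===== LEMMAS AND PROOFS =====

-- proof-side abbreviations
def pvOk (c : Char) : Bool := PySem.Set.contains pyOkSet c
def pvP (c : Char) : Bool := c == '_'

-- what A's loop emits, given whether the previously recorded last_i was '_'
def pvOutA : List Char → Bool → List Char
  | [], _ => []
  | c :: s, b =>
    if pvOk c then c :: pvOutA s false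
    else (if b then [] else ['_']) ++ pvOutA s true

-- the token list split₀ produces on the mapped string (cur = current token, reversed)
def pvToks : List Char → List Char → List (List Char)
  | [], cur => if cur.isEmpty then [] else [cur.reverse]
  | c :: s, cur =>
    if pvOk c then pvToks s (c :: cur)
    else if cur.isEmpty then pvToks s [] else cur.reverse :: pvToks s []

def pvRstrip (xs : List Char) : List Char := (List.dropWhile pvP xs.reverse).reverse

theorem pvOk_facts (c : Char) (h : pvOk c = true) :
    PySem.Chars.isspace c = false ∧ pvP c = false := by
  have hm : c ∈ pyOkSet := (PySem.Set.contains_iff _ _).mp h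
  have hall : pyOkSet.all (fun c => !PySem.Chars.isspace c && !(c == '_')) = true := by decide
  have hc := List.all_eq_true.mp hall c hm
  simp at hc
  refine ⟨hc.1, ?_⟩
  simp [pvP, hc.2]

theorem pvP_underscore : pvP '_' = true := by decide

-- A's fold characterised by pvOutA
theorem pvFoldA (s : List Char) (res : List Char) (last : Option Char) :
    (s.foldl
      (fun (st : List Char × Option Char) i =>
        if PySem.Set.contains pyEscapeAcceptabled i then (st.1 ++ [i], some i)
        else if some '_' ≠ st.2 then (st.1 ++ ['_'], some '_') else (st.1, some '_'))
      (res, last)).1 = res ++ pvOutA s (last == some '_') := by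
  induction s generalizing res last with
  | nil => simp [pvOutA]
  | cons c s ih =>
    rw [List.foldl_cons]
    by_cases hc : pvOk c = true
    · rw [if_pos (show PySem.Set.contains pyEscapeAcceptabled c = true from hc), ih]
      have hb : (c == '_') = false := by simpa [pvP] using (pvOk_facts c hc).2
      simp [pvOutA, hc, hb]
    · have hc' : pvOk c = false := by simpa using hc
      rw [if_neg (show ¬ PySem.Set.contains pyEscapeAcceptabled c = true from hc)]
      by_cases hl : last = some '_'
      · rw [if_neg (show ¬ some '_' ≠ (res, last).2 from by simp [hl]), ih]
        simp [pvOutA, hc', hl]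
      · rw [if_pos (show some '_' ≠ (res, last).2 from by simp [Ne.symm hl]), ih]
        have hb : (last == some '_') = false := by simpa using hl
        simp [pvOutA, hc', hb]

-- split₀.go on the mapped list characterised by pvToks
theorem pvGoToks (s : List Char) (cur : List Char) (acc : List (List Char)) :
    PySem.Chars.split₀.go (s.map (fun c => if pvOk c then c else ' ')) cur acc
      = acc.reverse ++ pvToks s cur := by
  induction s generalizing cur acc with
  | nil =>
    by_cases h : cur.isEmpty
    · simp [PySem.Chars.split₀.go, pvToks, h]
    · simp [PySem.Chars.split₀.go, pvToks, h]
  | cons c s ih =>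
    by_cases hc : pvOk c = true
    · have hsp := (pvOk_facts c hc).1
      simp [PySem.Chars.split₀.go, pvToks, hc, hsp, ih]
    · have hc' : pvOk c = false := by simpa using hc
      have hsp : PySem.Chars.isspace ' ' = true := by decide
      by_cases h : cur.isEmpty
      · simp [PySem.Chars.split₀.go, pvToks, hc', hsp, h, ih]
      · simp [PySem.Chars.split₀.go, pvToks, hc', hsp, h, ih]

-- every emitted token is nonempty
theorem pvToks_ne_nil (s : List Char) (cur : List Char) (t : List Char)
    (ht : t ∈ pvToks s cur) : t ≠ [] := by
  induction s generalizing cur with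
  | nil =>
    by_cases h : cur.isEmpty
    · simp [pvToks, h] at ht
    · simp [pvToks, h] at ht
      subst ht
      simp_all [List.isEmpty_iff]
  | cons c s ih =>
    by_cases hc : pvOk c = true
    · simp [pvToks, hc] at ht; exact ih _ ht
    · have hc' : pvOk c = false := by simpa using hc
      by_cases h : cur.isEmpty
      · simp [pvToks, hc', h] at ht; exact ih _ ht
      · simp [pvToks, hc', h] at ht
        rcases ht with ht | ht
        · subst ht; simp_all [List.isEmpty_iff]
        · exact ih _ ht

theorem pvJoin_eq_nil_iff (toks : List (List Char)) (h : ∀ t ∈ toks, t ≠ []) :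
    PySem.Chars.join ['_'] toks = [] ↔ toks = [] := by
  cases toks with
  | nil => simp [PySem.Chars.join_nil]
  | cons t rest =>
    have ht := h t (by simp)
    constructor
    · intro hj
      cases rest with
      | nil =>
        rw [PySem.Chars.join_singleton] at hj
        exact absurd hj ht
      | cons u rest' =>
        rw [PySem.Chars.join_cons_cons] at hj
        simp at hj
    · intro hx; cases hx

theorem pvDropWhile_all_false {xs : List Char} (h : ∀ c ∈ xs, pvP c = false) :
    List.dropWhile pvP xs = xs := by
  cases xs with
  | nil => rfl
  | cons x xs => simp [h x (by simp)]

-- lstrip('_') turns the b = false emission into the b = true emission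
theorem pvDropOutA (s : List Char) (b : Bool) :
    List.dropWhile pvP (pvOutA s b) = pvOutA s true := by
  induction s generalizing b with
  | nil => simp [pvOutA]
  | cons c s ih =>
    by_cases hc : pvOk c = true
    · have hp := (pvOk_facts c hc).2
      simp [pvOutA, hc, hp]
    · have hc' : pvOk c = false := by simpa using hc
      cases b with
      | false => simp [pvOutA, hc', pvP_underscore, ih]
      | true => simp [pvOutA, hc', ih]

-- main invariant: rstrip('_') of the emission = '_'.join of the tokens
theorem pvMain (s : List Char) :
    (∀ cur : List Char, cur ≠ [] → (∀ c ∈ cur, pvOk c = true) →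
      pvRstrip (cur.reverse ++ pvOutA s false) = PySem.Chars.join ['_'] (pvToks s cur))
    ∧ pvRstrip (pvOutA s true) = PySem.Chars.join ['_'] (pvToks s []) := by
  induction s with
  | nil =>
    constructor
    · intro cur hne hok
      have hall : ∀ c ∈ cur.reverse, pvP c = false := by
        intro c hmem
        exact (pvOk_facts c (hok c (by simpa using hmem))).2
      have hemp : cur.isEmpty = false := by simpa [List.isEmpty_iff] using hne
      simp [pvOutA, pvToks, hemp, pvRstrip, pvDropWhile_all_false (by simpa using hall),
        PySem.Chars.join_singleton]
    · simp [pvOutA, pvToks, pvRstrip, PySem.Chars.join_nil]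
  | cons c s ih =>
    by_cases hc : pvOk c = true
    · -- accepted character: extends the current token
      have hG : ∀ cur : List Char, cur ≠ [] → (∀ c' ∈ cur, pvOk c' = true) →
          pvRstrip (cur.reverse ++ pvOutA (c :: s) false)
            = PySem.Chars.join ['_'] (pvToks (c :: s) cur) := by
        intro cur hne hok
        have harg : cur.reverse ++ pvOutA (c :: s) false
            = (c :: cur).reverse ++ pvOutA s false := by
          simp [pvOutA, hc]
        rw [harg, pvToks, if_pos hc]
        exact ih.1 (c :: cur) (by simp) (by
          intro c' hm
          rcases List.mem_cons.mp hm with h | h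
          · subst h; exact hc
          · exact hok c' h)
      refine ⟨hG, ?_⟩
      have harg : pvOutA (c :: s) true = [c].reverse ++ pvOutA s false := by
        simp [pvOutA, hc]
      rw [harg, pvToks, if_pos hc]
      exact ih.1 [c] (by simp) (by intro c' hm; simp at hm; subst hm; exact hc)
    · -- rejected character
      have hc' : pvOk c = false := by simpa using hc
      have hQ : pvRstrip (pvOutA (c :: s) true) = PySem.Chars.join ['_'] (pvToks (c :: s) []) := by
        simp [pvOutA, hc', pvToks, ih.2]
      refine ⟨?_, hQ⟩
      intro cur hne hok
      have hemp : cur.isEmpty = false := by simpa [List.isEmpty_iff] using hne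
      have hout : cur.reverse ++ pvOutA (c :: s) false
          = cur.reverse ++ '_' :: pvOutA s true := by simp [pvOutA, hc']
      have htok : pvToks (c :: s) cur = cur.reverse :: pvToks s [] := by
        simp [pvToks, hc', hemp]
      rw [hout, htok]
      have hrev : (cur.reverse ++ '_' :: pvOutA s true).reverse
          = (pvOutA s true).reverse ++ '_' :: cur := by simp
      have hcurP : ∀ c' ∈ cur, pvP c' = false := by
        intro c' hm
        exact (pvOk_facts c' (hok c' hm)).2
      by_cases hE : (List.dropWhile pvP (pvOutA s true).reverse).isEmpty = true
      · -- no token remains on the right: the separator '_' is stripped too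
        have hQnil : pvRstrip (pvOutA s true) = [] := by
          simp [pvRstrip, List.isEmpty_iff.mp hE]
        have htoknil : pvToks s [] = [] := by
          have h2 := ih.2
          rw [hQnil] at h2
          exact (pvJoin_eq_nil_iff _ (fun t ht => pvToks_ne_nil s [] t ht)).mp h2.symm
        rw [pvRstrip, hrev, List.dropWhile_append, if_pos hE]
        simp [pvP_underscore, pvDropWhile_all_false hcurP, htoknil,
          PySem.Chars.join_singleton]
      · -- a token remains: the separator '_' stays
        have hE' : (List.dropWhile pvP (pvOutA s true).reverse).isEmpty = false := by
          simpa using hE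
        have htokne : pvToks s [] ≠ [] := by
          intro hx
          have h2 := ih.2
          rw [hx, PySem.Chars.join_nil] at h2
          have h3 : List.dropWhile pvP (pvOutA s true).reverse = [] := by
            have h4 := congrArg List.reverse h2
            simpa [pvRstrip] using h4
          simp [h3] at hE'
        rw [pvRstrip, hrev, List.dropWhile_append, if_neg (by simp [hE'])]
        obtain ⟨u, rest, hur⟩ := List.exists_cons_of_ne_nil htokne
        have hfin : (List.dropWhile pvP (pvOutA s true).reverse ++ '_' :: cur).reverse
            = cur.reverse ++ '_' :: pvRstrip (pvOutA s true) := by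
          simp [pvRstrip]
        rw [hfin, ih.2, hur]
        cases rest with
        | nil => simp [PySem.Chars.join_singleton, PySem.Chars.join_cons_cons]
        | cons v rest' => simp [PySem.Chars.join_cons_cons]

theorem pvStripCharsEq (xs : List Char) :
    PySem.Chars.stripChars xs ['_']
      = pvRstrip (List.dropWhile pvP xs) := by
  unfold PySem.Chars.stripChars pvRstrip
  have h : (fun c => (['_'] : List Char).contains c) = pvP := by
    funext c
    by_cases hx : c = '_' <;> simp [pvP, hx]
  simp only [h]

-- ===== VERDICT (by name: the statement is the Claim_ definition above) =====
theorem escape_word_spec : Claim_equal_escape_word := by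
  intro word _
  unfold Spec_escape_word escape_word escape_word_alt
  apply String.toList_inj.mp
  rw [PySem.Str.toList_stripChars, PySem.Str.toList_join, PySem.Str.split₀_map_toList,
    String.toList_ofList, String.toList_ofList]
  rw [String.toList_ofList, pvFoldA _ [] none]
  have hb0 : ((none : Option Char) == some '_') = false := rfl
  rw [hb0]
  have hfun : (fun c => if PySem.Set.contains pyOkSet c then c else ' ')
      = (fun c => if pvOk c then c else ' ') := rfl
  rw [hfun, List.nil_append, PySem.Chars.split₀, pvGoToks _ [] [], pvStripCharsEq, pvDropOutA]
  simpa using (pvMain _).2
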